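-- pv_equiv track=rewrite | github.com/ango12138/pytorch_geometric | torch_geometric/loader/ibmb_loader.py | prime_post_process
-- ===== SOURCE A (Python) =====
-- from heapq import heapify, heappop, heappush
--
-- def prime_post_process(loader, merge_max_size):
--     h = [(
--         len(p),
--         p,
--     ) for p in loader]
--     heapify(h)
--
--     while len(h) > 1:
--         len1, p1 = heappop(h)
--         len2, p2 = heappop(h)
--         if len1 + len2 <= merge_max_size:
--             heappush(h, (len1 + len2, p1 + p2))
--         else:
--             heappush(h, (
--                 len1,
--                 p1,
--             ))
--             heappush(h, (
--                 len2,
--                 p2,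
--             ))
--             break
--
--     new_batch = []
--
--     while len(h):
--         _, p = heappop(h)
--         new_batch.append(p)
--
--     return new_batch
-- ===== SOURCE B (Python) =====
-- def prime_post_process(loader, merge_max_size):
--     # Two-queue (Huffman-style) greedy merge: sort the partitions once, then keep
--     # a FIFO of merged partitions.  Each merged partition is >= every earlier one
--     # in the (len, partition) order, so the FIFO stays sorted by construction and
--     # the two globally smallest entries always sit at the fronts of the two queues.
--     q1 = sorted((len(p), p) for p in loader)
--     q2 = []  # merged partitions, appended in nondecreasing (len, partition) order
--     i = j = 0
--
--     def pop():
--         nonlocal i, j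
--         if j == len(q2) or (i < len(q1) and q1[i] <= q2[j]):
--             i += 1
--             return q1[i - 1]
--         j += 1
--         return q2[j - 1]
--
--     while (len(q1) - i) + (len(q2) - j) > 1:
--         oi, oj = i, j
--         len1, p1 = pop()
--         len2, p2 = pop()
--         if len1 + len2 > merge_max_size:
--             i, j = oi, oj
--             break
--         q2.append((len1 + len2, p1 + p2))
--
--     new_batch = []
--     while (len(q1) - i) + (len(q2) - j) > 0:
--         new_batch.append(pop()[1])
--     return new_batch
-- ===== Notes on version B (the rewrite author's own statement) =====
-- stated objective: alternative
-- what changed: Replaces the priority queue entirely by the two-queue Huffman technique: the partitions are sorted once, merged partitions go into a plain FIFO list (each new merge is provably >= every earlier one, so the FIFO stays sorted with no heap operations and no re-insertion), and each step just compares the fronts of the two queues; the final batch is the two-way merge of the leftovers.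
import Mathlib
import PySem

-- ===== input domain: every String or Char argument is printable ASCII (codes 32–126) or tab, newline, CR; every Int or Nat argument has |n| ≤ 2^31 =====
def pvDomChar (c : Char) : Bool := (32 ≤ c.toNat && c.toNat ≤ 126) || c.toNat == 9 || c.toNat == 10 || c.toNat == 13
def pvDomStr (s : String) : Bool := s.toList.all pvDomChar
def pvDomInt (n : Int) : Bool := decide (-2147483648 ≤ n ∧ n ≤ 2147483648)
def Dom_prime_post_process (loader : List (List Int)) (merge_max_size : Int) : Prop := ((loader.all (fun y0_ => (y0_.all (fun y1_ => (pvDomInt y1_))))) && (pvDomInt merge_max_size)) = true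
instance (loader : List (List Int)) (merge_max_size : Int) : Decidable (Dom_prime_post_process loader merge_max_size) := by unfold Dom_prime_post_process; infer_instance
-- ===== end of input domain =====

-- B drops the priority queue for the two-queue (Huffman) technique: one initial sort,
-- merged partitions appended to a plain FIFO (provably already in order), fronts compared;
-- objective: alternative algorithm, no per-step heap/reinsertion work.

-- Python's comparison on list[int] (lexicographic, prefix rule), as a ≤ test.
def lleb : List Int → List Int → Bool
  | [], _ => true
  | _ :: _, [] => false
  | a :: x, b :: y => if a < b then true else if b < a then false else lleb x y

-- Python's ≤ on (int, list[int]) tuples (lexicographic).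
def leb (p q : Int × List Int) : Bool :=
  if p.1 < q.1 then true else if q.1 < p.1 then false else lleb p.2 q.2

-- ===== PORT A =====
-- heapq is ported by its priority-queue semantics: heappop yields a least element
-- w.r.t. Python's tuple order `leb`; equal keys are equal (len, list) values, so this
-- is exactly the value sequence Python's binary heap pops.
def ppMin : (Int × List Int) → List (Int × List Int) → Int × List Int
  | m, [] => m
  | m, x :: xs => ppMin (if leb m x then m else x) xs

def ppPop (h : List (Int × List Int)) : (Int × List Int) × List (Int × List Int) :=
  match h with
  | [] => ((0, []), [])
  | x :: xs => ((ppMin x xs), (x :: xs).erase (ppMin x xs))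

theorem ppMin_mem : ∀ (xs : List (Int × List Int)) (m : Int × List Int), ppMin m xs ∈ m :: xs := by
  intro xs
  induction xs with
  | nil => intro m; simp [ppMin]
  | cons x xs ih =>
    intro m
    simp only [ppMin]
    rcases List.mem_cons.1 (ih (if leb m x then m else x)) with h | h
    · rw [h]; split_ifs <;> simp
    · simp [h]

theorem ppPop_length (h : List (Int × List Int)) (hne : h ≠ []) :
    (ppPop h).2.length + 1 = h.length := by
  match h, hne with
  | [], hne => exact absurd rfl hne
  | x :: xs, _ =>
    simp only [ppPop]
    have := List.length_erase_of_mem (ppMin_mem xs x)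
    simp at this ⊢
    omega

-- A's while-loop: pop the two least, merge if the cap allows, else push back and break.
def aloop (h : List (Int × List Int)) (cap : Int) : List (Int × List Int) :=
  if h.length ≤ 1 then h
  else
    if (ppPop h).1.1 + (ppPop (ppPop h).2).1.1 ≤ cap then
      aloop (((ppPop h).1.1 + (ppPop (ppPop h).2).1.1,
              (ppPop h).1.2 ++ (ppPop (ppPop h).2).1.2) :: (ppPop (ppPop h).2).2) cap
    else (ppPop h).1 :: (ppPop (ppPop h).2).1 :: (ppPop (ppPop h).2).2
termination_by h.length
decreasing_by
  rename_i h1 _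
  have hne : h ≠ [] := by intro e; subst e; simp at h1
  have e1 := ppPop_length h hne
  have hne2 : (ppPop h).2 ≠ [] := by
    intro e; rw [e] at e1; simp at e1; omega
  have e2 := ppPop_length _ hne2
  simp only [List.length_cons]
  omega

-- A's final drain: pop everything, keep the partitions.
def drain (h : List (Int × List Int)) : List (List Int) :=
  if hne : h = [] then [] else (ppPop h).1.2 :: drain (ppPop h).2
termination_by h.length
decreasing_by
  have := ppPop_length h hne
  omega

def prime_post_process (loader : List (List Int)) (merge_max_size : Int) : List (List Int) :=
  drain (aloop (loader.map (fun p => ((p.length : Int), p))) merge_max_size)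

-- ===== PORT B =====
-- sorted((len(p), p) for p in loader): ported as an insertion sort by Python's tuple
-- order (the order is total and antisymmetric, so every sort returns this same list).
def ins (x : Int × List Int) : List (Int × List Int) → List (Int × List Int)
  | [] => [x]
  | y :: ys => if leb y x then y :: ins x ys else x :: y :: ys

-- B's pop(): take the front of q1 or q2, preferring q1 when q1[i] <= q2[j]
-- (index-front queues are ported as the remaining suffix lists).
def popQ (q1s q2s : List (Int × List Int)) :
    (Int × List Int) × List (Int × List Int) × List (Int × List Int) :=
  match q1s, q2s with
  | [], [] => ((0, []), [], [])   -- never reached: callers guard on nonemptiness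
  | a :: t, [] => (a, t, [])
  | [], b :: u => (b, [], u)
  | a :: t, b :: u => if leb a b then (a, t, b :: u) else (b, a :: t, u)

theorem popQ_length (q1s q2s : List (Int × List Int)) (h : q1s.length + q2s.length ≠ 0) :
    (popQ q1s q2s).2.1.length + (popQ q1s q2s).2.2.length + 1 = q1s.length + q2s.length := by
  match q1s, q2s with
  | [], [] => simp at h
  | a :: t, [] => simp [popQ]
  | [], b :: u => simp [popQ]
  | a :: t, b :: u =>
    simp only [popQ]
    split <;> simp <;> omega

-- B's merge loop: pop the two fronts, restore and break if over the cap,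
-- else append the merged partition to the back of the FIFO q2.
def bloop2 (q1s q2s : List (Int × List Int)) (cap : Int) :
    List (Int × List Int) × List (Int × List Int) :=
  if q1s.length + q2s.length ≤ 1 then (q1s, q2s)
  else
    if (popQ q1s q2s).1.1 + (popQ (popQ q1s q2s).2.1 (popQ q1s q2s).2.2).1.1 > cap then
      (q1s, q2s)
    else
      bloop2 (popQ (popQ q1s q2s).2.1 (popQ q1s q2s).2.2).2.1
        ((popQ (popQ q1s q2s).2.1 (popQ q1s q2s).2.2).2.2 ++
          [((popQ q1s q2s).1.1 + (popQ (popQ q1s q2s).2.1 (popQ q1s q2s).2.2).1.1,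
            (popQ q1s q2s).1.2 ++ (popQ (popQ q1s q2s).2.1 (popQ q1s q2s).2.2).1.2)]) cap
termination_by q1s.length + q2s.length
decreasing_by
  rename_i hg _hc
  have h1 : q1s.length + q2s.length ≠ 0 := by omega
  have e1 := popQ_length q1s q2s h1
  have h2 : (popQ q1s q2s).2.1.length + (popQ q1s q2s).2.2.length ≠ 0 := by omega
  have e2 := popQ_length _ _ h2
  simp only [List.length_append, List.length_cons, List.length_nil]
  omega

-- B's final loop: pop the leftovers of both queues in ascending order.
def drain2 (q1s q2s : List (Int × List Int)) : List (List Int) :=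
  if hg : q1s.length + q2s.length = 0 then []
  else (popQ q1s q2s).1.2 :: drain2 (popQ q1s q2s).2.1 (popQ q1s q2s).2.2
termination_by q1s.length + q2s.length
decreasing_by
  have := popQ_length q1s q2s hg
  omega

def prime_post_process_alt (loader : List (List Int)) (merge_max_size : Int) : List (List Int) :=
  drain2 (bloop2 (loader.foldl (fun s p => ins ((p.length : Int), p) s) []) [] merge_max_size).1
         (bloop2 (loader.foldl (fun s p => ins ((p.length : Int), p) s) []) [] merge_max_size).2

-- ===== PRECONDITION & SPEC =====
def Spec_prime_post_process (loader : List (List Int)) (merge_max_size : Int) (out : List (List Int)) : Prop := out = prime_post_process_alt loader merge_max_size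
instance (loader : List (List Int)) (merge_max_size : Int) (out : List (List Int)) : Decidable (Spec_prime_post_process loader merge_max_size out) := by unfold Spec_prime_post_process; infer_instance

-- ===== CLAIM (what is proved, stated in full; the proofs are below) =====
def Claim_equal_prime_post_process : Prop := ∀ (loader : List (List Int)) (merge_max_size : Int), Dom_prime_post_process loader merge_max_size → Spec_prime_post_process loader merge_max_size (prime_post_process loader merge_max_size)

-- ===== LEMMAS AND PROOFS =====

theorem lleb_refl : ∀ x, lleb x x = true := by
  intro x
  induction x with
  | nil => rfl
  | cons a x ih => simp [lleb, ih]

theorem leb_refl (p : Int × List Int) : leb p p = true := by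
  simp [leb, lleb_refl]

theorem lleb_total : ∀ x y, lleb x y = true ∨ lleb y x = true := by
  intro x
  induction x with
  | nil => intro y; left; rfl
  | cons a x ih =>
    intro y
    cases y with
    | nil => right; rfl
    | cons b ys =>
      simp only [lleb]
      rcases lt_trichotomy a b with h | h | h
      · left; simp [h]
      · subst h; simpa using ih ys
      · right; simp [h]

theorem leb_total (p q : Int × List Int) : leb p q = true ∨ leb q p = true := by
  unfold leb
  rcases lt_trichotomy p.1 q.1 with h | h | h
  · left; simp [h]
  · rw [h]; simp; exact lleb_total p.2 q.2
  · right; simp [h]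

theorem lleb_antisymm : ∀ x y, lleb x y = true → lleb y x = true → x = y := by
  intro x
  induction x with
  | nil =>
    intro y _ h2
    cases y with
    | nil => rfl
    | cons b ys => simp [lleb] at h2
  | cons a x ih =>
    intro y h1 h2
    cases y with
    | nil => simp [lleb] at h1
    | cons b ys =>
      simp only [lleb] at h1 h2
      split_ifs at h1 h2 <;> try omega
      rename_i hab hba
      have : a = b := by omega
      subst this
      rw [ih ys h1 h2]

theorem leb_antisymm (p q : Int × List Int) (h1 : leb p q = true) (h2 : leb q p = true) : p = q := by
  unfold leb at h1 h2
  split_ifs at h1 h2 <;> try omega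
  have e1 : p.1 = q.1 := by omega
  have e2 : p.2 = q.2 := lleb_antisymm _ _ h1 h2
  exact Prod.ext e1 e2

theorem lleb_trans : ∀ x y z, lleb x y = true → lleb y z = true → lleb x z = true := by
  intro x
  induction x with
  | nil => intro y z _ _; rfl
  | cons a x ih =>
    intro y z h1 h2
    cases y with
    | nil => simp [lleb] at h1
    | cons b ys =>
      cases z with
      | nil => simp [lleb] at h2
      | cons c zs =>
        simp only [lleb] at h1 h2 ⊢
        split_ifs at h1 h2 ⊢ <;> try omega
        exact ih ys zs h1 h2

theorem leb_trans (p q r : Int × List Int) (h1 : leb p q = true) (h2 : leb q r = true) : leb p r = true := by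
  unfold leb at h1 h2 ⊢
  split_ifs at h1 h2 ⊢ <;> try omega
  exact lleb_trans _ _ _ h1 h2

def SortedP (s : List (Int × List Int)) : Prop :=
  List.Pairwise (fun a b => leb a b = true) s

theorem ins_perm (x : Int × List Int) : ∀ s, List.Perm (ins x s) (x :: s) := by
  intro s
  induction s with
  | nil => exact List.Perm.refl _
  | cons y ys ih =>
    simp only [ins]
    split
    · exact (ih.cons y).trans (List.Perm.swap x y ys)
    · exact List.Perm.refl _

theorem ins_sorted (x : Int × List Int) : ∀ s, SortedP s → SortedP (ins x s) := by
  intro s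
  induction s with
  | nil => intro _; simp [ins, SortedP]
  | cons y ys ih =>
    intro hs
    rcases List.pairwise_cons.1 hs with ⟨hy, hys⟩
    simp only [ins]
    split
    · rename_i hyx
      refine List.pairwise_cons.2 ⟨?_, ih hys⟩
      intro z hz
      rcases List.mem_cons.1 ((ins_perm x ys).mem_iff.1 hz) with h | h
      · subst h; exact hyx
      · exact hy z h
    · rename_i hyx
      have hxy : leb x y = true := by
        rcases leb_total x y with h | h
        · exact h
        · exact absurd h hyx
      refine List.pairwise_cons.2 ⟨?_, hs⟩
      intro z hz
      rcases List.mem_cons.1 hz with h | h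
      · subst h; exact hxy
      · exact leb_trans x y z hxy (hy z h)

theorem foldl_ins_perm : ∀ (l : List (List Int)) (s : List (Int × List Int)),
    List.Perm (l.foldl (fun s p => ins ((p.length : Int), p) s) s)
      (s ++ l.map (fun p => ((p.length : Int), p))) := by
  intro l
  induction l with
  | nil => intro s; simp
  | cons p l ih =>
    intro s
    simp only [List.foldl_cons, List.map_cons]
    refine (ih (ins ((p.length : Int), p) s)).trans ?_
    refine (List.Perm.append_right _ (ins_perm _ s)).trans ?_
    simpa using (List.perm_middle).symm

theorem foldl_ins_sorted : ∀ (l : List (List Int)) (s : List (Int × List Int)), SortedP s →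
    SortedP (l.foldl (fun s p => ins ((p.length : Int), p) s) s) := by
  intro l
  induction l with
  | nil => intro s hs; exact hs
  | cons p l ih =>
    intro s hs
    exact ih _ (ins_sorted _ s hs)

theorem ppMin_le : ∀ (xs : List (Int × List Int)) (m : Int × List Int),
    ∀ z ∈ m :: xs, leb (ppMin m xs) z = true := by
  intro xs
  induction xs with
  | nil =>
    intro m z hz
    simp at hz
    subst hz
    exact leb_refl _
  | cons x xs ih =>
    intro m z hz
    simp only [ppMin]
    have hm'm : leb (if leb m x then m else x) m = true := by
      split_ifs with h
      · exact leb_refl m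
      · rcases leb_total m x with h' | h'
        · exact absurd h' h
        · exact h'
    have hm'x : leb (if leb m x then m else x) x = true := by
      split_ifs with h
      · exact h
      · exact leb_refl x
    have hmin : leb (ppMin (if leb m x then m else x) xs) (if leb m x then m else x) = true :=
      ih _ _ List.mem_cons_self
    rcases List.mem_cons.1 hz with h | h
    · subst h; exact leb_trans _ _ _ hmin hm'm
    rcases List.mem_cons.1 h with h | h
    · subst h; exact leb_trans _ _ _ hmin hm'x
    · exact ih _ _ (List.mem_cons_of_mem _ h)

theorem ppPop_perm (h : List (Int × List Int)) (hne : h ≠ []) :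
    List.Perm h ((ppPop h).1 :: (ppPop h).2) := by
  match h with
  | [] => exact absurd rfl hne
  | x :: xs =>
    simp only [ppPop]
    exact List.perm_cons_erase (ppMin_mem xs x)

theorem ppPop_mem (h : List (Int × List Int)) (hne : h ≠ []) : (ppPop h).1 ∈ h := by
  match h with
  | [] => exact absurd rfl hne
  | x :: xs => exact ppMin_mem xs x

theorem ppPop_le (h : List (Int × List Int)) (hne : h ≠ []) :
    ∀ z ∈ h, leb (ppPop h).1 z = true := by
  match h with
  | [] => exact absurd rfl hne
  | x :: xs => exact fun z hz => ppMin_le xs x z hz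

-- The head of the sorted mirror is exactly the value the pop returns.
theorem pop_of_sorted (h s : List (Int × List Int)) (hperm : List.Perm h s) (hs : SortedP s)
    (hne : h ≠ []) : ∃ tail, s = (ppPop h).1 :: tail ∧ List.Perm (ppPop h).2 tail := by
  cases s with
  | nil => exact absurd hperm.eq_nil hne
  | cons c tail =>
    rcases List.pairwise_cons.1 hs with ⟨hc, _⟩
    have hm_mem_s : (ppPop h).1 ∈ c :: tail := hperm.mem_iff.1 (ppPop_mem h hne)
    have hcm : leb c (ppPop h).1 = true := by
      rcases List.mem_cons.1 hm_mem_s with e | e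
      · rw [e]; exact leb_refl _
      · exact hc _ e
    have hmc : leb (ppPop h).1 c = true :=
      ppPop_le h hne c (hperm.mem_iff.2 List.mem_cons_self)
    have hec : (ppPop h).1 = c := leb_antisymm _ _ hmc hcm
    refine ⟨tail, by rw [hec], ?_⟩
    have hstep : List.Perm ((ppPop h).1 :: (ppPop h).2) ((ppPop h).1 :: tail) := by
      refine ((ppPop_perm h hne).symm.trans hperm).trans ?_
      rw [hec]
    exact hstep.cons_inv

theorem drain_eq : ∀ (s h : List (Int × List Int)), List.Perm h s → SortedP s →
    drain h = s.map Prod.snd := by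
  intro s
  induction s with
  | nil =>
    intro h hperm _
    have : h = [] := hperm.eq_nil
    subst this
    rw [drain]
    simp
  | cons c tail ih =>
    intro h hperm hs
    have hne : h ≠ [] := by
      intro e; subst e
      exact absurd hperm.symm.eq_nil (by simp)
    rcases pop_of_sorted h (c :: tail) hperm hs hne with ⟨tail', he, hp⟩
    rcases List.cons_eq_cons.1 he.symm with ⟨hc, ht⟩
    rw [drain, dif_neg hne, hc]
    have := ih (ppPop h).2 (ht ▸ hp) (List.pairwise_cons.1 hs).2
    simp [this]

-- ---- the sorted two-way merge that mirrors the pool of B's two queues ----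
def mergeQ : List (Int × List Int) → List (Int × List Int) → List (Int × List Int)
  | [], u => u
  | t, [] => t
  | a :: t, b :: u => if leb a b then a :: mergeQ t (b :: u) else b :: mergeQ (a :: t) u
termination_by t u => t.length + u.length

theorem mergeQ_nil_right : ∀ t, mergeQ t [] = t := by
  intro t; cases t <;> simp [mergeQ]

theorem mergeQ_perm : ∀ t u, List.Perm (mergeQ t u) (t ++ u) := by
  intro t
  induction t with
  | nil => intro u; simp [mergeQ]
  | cons a t ih =>
    intro u
    induction u with
    | nil => simp [mergeQ_nil_right]
    | cons b u ihu =>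
      simp only [mergeQ]
      split
      · exact ((ih (b :: u)).cons a)
      · exact (ihu.cons b).trans (List.perm_middle).symm

theorem mergeQ_length (t u : List (Int × List Int)) :
    (mergeQ t u).length = t.length + u.length := by
  have := (mergeQ_perm t u).length_eq
  simpa using this

theorem mergeQ_sorted : ∀ t u, SortedP t → SortedP u → SortedP (mergeQ t u) := by
  intro t
  induction t with
  | nil => intro u _ hu; simpa [mergeQ] using hu
  | cons a t ih =>
    intro u
    induction u with
    | nil => intro ht _; simpa [mergeQ_nil_right] using ht
    | cons b u ihu =>
      intro ht hu
      rcases List.pairwise_cons.1 ht with ⟨hat, ht'⟩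
      rcases List.pairwise_cons.1 hu with ⟨hbu, hu'⟩
      simp only [mergeQ]
      split
      · rename_i hab
        refine List.pairwise_cons.2 ⟨?_, ih (b :: u) ht' hu⟩
        intro z hz
        have hz' := (mergeQ_perm t (b :: u)).mem_iff.1 hz
        rcases List.mem_append.1 hz' with h | h
        · exact hat z h
        rcases List.mem_cons.1 h with h | h
        · subst h; exact hab
        · exact leb_trans a b z hab (hbu z h)
      · rename_i hab
        have hba : leb b a = true := by
          rcases leb_total a b with h | h
          · exact absurd h hab
          · exact h
        refine List.pairwise_cons.2 ⟨?_, ihu ht hu'⟩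
        intro z hz
        have hz' := (mergeQ_perm (a :: t) u).mem_iff.1 hz
        rcases List.mem_append.1 hz' with h | h
        · rcases List.mem_cons.1 h with h | h
          · subst h; exact hba
          · exact leb_trans b a z hba (hat z h)
        · exact hbu z h

theorem mergeQ_step (q1s q2s : List (Int × List Int)) (h : q1s.length + q2s.length ≠ 0) :
    mergeQ q1s q2s = (popQ q1s q2s).1 :: mergeQ (popQ q1s q2s).2.1 (popQ q1s q2s).2.2 := by
  match q1s, q2s with
  | [], [] => simp at h
  | a :: t, [] => simp [popQ, mergeQ_nil_right]
  | [], b :: u => simp [popQ, mergeQ]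
  | a :: t, b :: u =>
    simp only [popQ, mergeQ]
    split <;> simp

theorem popQ_mem (q1s q2s : List (Int × List Int)) (h : q1s.length + q2s.length ≠ 0) :
    (popQ q1s q2s).1 ∈ q1s ++ q2s := by
  have hstep := mergeQ_step q1s q2s h
  have : (popQ q1s q2s).1 ∈ mergeQ q1s q2s := by rw [hstep]; exact List.mem_cons_self
  exact (mergeQ_perm q1s q2s).mem_iff.1 this

theorem popQ_le (q1s q2s : List (Int × List Int)) (h : q1s.length + q2s.length ≠ 0)
    (h1 : SortedP q1s) (h2 : SortedP q2s) :
    ∀ z, (z ∈ (popQ q1s q2s).2.1 ∨ z ∈ (popQ q1s q2s).2.2) → leb (popQ q1s q2s).1 z = true := by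
  intro z hz
  have hs := mergeQ_sorted q1s q2s h1 h2
  rw [mergeQ_step q1s q2s h] at hs
  have hzmem : z ∈ mergeQ (popQ q1s q2s).2.1 (popQ q1s q2s).2.2 :=
    (mergeQ_perm _ _).mem_iff.2 (List.mem_append.2 hz)
  exact (List.pairwise_cons.1 hs).1 z hzmem

theorem popQ_sub1 (q1s q2s : List (Int × List Int)) :
    ∀ z ∈ (popQ q1s q2s).2.1, z ∈ q1s := by
  match q1s, q2s with
  | [], [] => simp [popQ]
  | a :: t, [] => intro z hz; exact List.mem_cons_of_mem _ hz
  | [], b :: u => simp [popQ]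
  | a :: t, b :: u =>
    intro z hz
    simp only [popQ] at hz
    split at hz
    · exact List.mem_cons_of_mem _ hz
    · exact hz

theorem popQ_sub2 (q1s q2s : List (Int × List Int)) :
    ∀ z ∈ (popQ q1s q2s).2.2, z ∈ q2s := by
  match q1s, q2s with
  | [], [] => simp [popQ]
  | a :: t, [] => simp [popQ]
  | [], b :: u => intro z hz; exact List.mem_cons_of_mem _ hz
  | a :: t, b :: u =>
    intro z hz
    simp only [popQ] at hz
    split at hz
    · exact hz
    · exact List.mem_cons_of_mem _ hz

theorem popQ_sorted1 (q1s q2s : List (Int × List Int)) (h : SortedP q1s) :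
    SortedP (popQ q1s q2s).2.1 := by
  match q1s, q2s with
  | [], [] => simp [popQ, SortedP]
  | a :: t, [] => exact (List.pairwise_cons.1 h).2
  | [], b :: u => simp [popQ, SortedP]
  | a :: t, b :: u =>
    simp only [popQ]
    split
    · exact (List.pairwise_cons.1 h).2
    · exact h

theorem popQ_sorted2 (q1s q2s : List (Int × List Int)) (h : SortedP q2s) :
    SortedP (popQ q1s q2s).2.2 := by
  match q1s, q2s with
  | [], [] => simp [popQ, SortedP]
  | a :: t, [] => simp [popQ, SortedP]
  | [], b :: u => exact (List.pairwise_cons.1 h).2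
  | a :: t, b :: u =>
    simp only [popQ]
    split
    · exact h
    · exact (List.pairwise_cons.1 h).2

-- key consistency: every pool entry carries its partition's length as key
def KL (s : List (Int × List Int)) : Prop := ∀ z ∈ s, z.1 = (z.2.length : Int)

-- Huffman invariant: every already-merged partition is ≤ the merge of ANY two pool entries.
def HInv (q1s q2s : List (Int × List Int)) : Prop :=
  ∀ z ∈ q2s, ∀ w1, (w1 ∈ q1s ∨ w1 ∈ q2s) → ∀ w2, (w2 ∈ q1s ∨ w2 ∈ q2s) →
    leb z (w1.1 + w2.1, w1.2 ++ w2.2) = true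

theorem leb_fst {p q : Int × List Int} (h : leb p q = true) : p.1 ≤ q.1 := by
  unfold leb at h
  split_ifs at h with h1 h2
  · omega
  · omega

theorem leb_of_eq_fst {p q : Int × List Int} (hf : p.1 = q.1) (h : leb p q = true) :
    lleb p.2 q.2 = true := by
  unfold leb at h
  split_ifs at h with h1 h2
  · exact absurd h1 (by omega)
  · exact h

theorem lleb_append : ∀ (a c b d : List Int), a.length = c.length →
    lleb a c = true → lleb b d = true → lleb (a ++ b) (c ++ d) = true := by
  intro a
  induction a with
  | nil =>
    intro c b d hlen hac hbd
    have : c = [] := by cases c with | nil => rfl | cons y c => simp at hlen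
    subst this
    simpa using hbd
  | cons x a ih =>
    intro c b d hlen hac hbd
    cases c with
    | nil => simp at hlen
    | cons y c =>
      simp only [List.cons_append, lleb] at hac ⊢
      rcases lt_trichotomy x y with hxy | hxy | hxy
      · simp [hxy]
      · subst hxy
        simp only [lt_irrefl, if_false] at hac ⊢
        exact ih c b d (by simpa using hlen) hac hbd
      · simp [show ¬ x < y from by omega, hxy] at hac

theorem oplus_mono {x y w1 w2 : Int × List Int}
    (hx : leb x w1 = true) (hy : leb y w2 = true)
    (kx : x.1 = (x.2.length : Int)) (kw1 : w1.1 = (w1.2.length : Int)) :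
    leb (x.1 + y.1, x.2 ++ y.2) (w1.1 + w2.1, w1.2 ++ w2.2) = true := by
  have h1 := leb_fst hx
  have h2 := leb_fst hy
  unfold leb
  dsimp only
  rcases lt_or_ge (x.1 + y.1) (w1.1 + w2.1) with hlt | hge
  · simp [hlt]
  · have e1 : x.1 = w1.1 := by omega
    have e2 : y.1 = w2.1 := by omega
    have hlen : x.2.length = w1.2.length := by
      have : (x.2.length : Int) = (w1.2.length : Int) := by rw [← kx, ← kw1]; omega
      exact_mod_cast this
    have hcat := lleb_append x.2 w1.2 y.2 w2.2 hlen (leb_of_eq_fst e1 hx) (leb_of_eq_fst e2 hy)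
    simp [show ¬ (x.1 + y.1 < w1.1 + w2.1) from by omega,
          show ¬ (w1.1 + w2.1 < x.1 + y.1) from by omega, hcat]

theorem leb_self_oplus_right {m w : Int × List Int} (kw : w.1 = (w.2.length : Int)) :
    leb m (m.1 + w.1, m.2 ++ w.2) = true := by
  unfold leb
  dsimp only
  rcases lt_or_ge 0 w.1 with h | h
  · simp [show m.1 < m.1 + w.1 from by omega]
  · have hw0 : w.1 = 0 := by
      have : (0 : Int) ≤ (w.2.length : Int) := by positivity
      omega
    have hwnil : w.2 = [] := by
      have : (w.2.length : Int) = 0 := by omega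
      have : w.2.length = 0 := by exact_mod_cast this
      exact List.length_eq_zero_iff.1 this
    simp [hw0, hwnil, lleb_refl]

theorem leb_self_oplus_left {m w : Int × List Int} (kw : w.1 = (w.2.length : Int)) :
    leb m (w.1 + m.1, w.2 ++ m.2) = true := by
  unfold leb
  dsimp only
  rcases lt_or_ge 0 w.1 with h | h
  · simp [show m.1 < w.1 + m.1 from by omega]
  · have hw0 : w.1 = 0 := by
      have : (0 : Int) ≤ (w.2.length : Int) := by positivity
      omega
    have hwnil : w.2 = [] := by
      have : (w.2.length : Int) = 0 := by omega
      have : w.2.length = 0 := by exact_mod_cast this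
      exact List.length_eq_zero_iff.1 this
    simp [hw0, hwnil, lleb_refl]

-- the main simulation: aloop on the heap pool agrees with bloop2 on the two queues
theorem loop_sim2 : ∀ (n : Nat) (q1s q2s h : List (Int × List Int)) (cap : Int),
    q1s.length + q2s.length ≤ n →
    List.Perm h (mergeQ q1s q2s) →
    SortedP q1s → SortedP q2s → KL q1s → KL q2s → HInv q1s q2s →
    List.Perm (aloop h cap) (mergeQ (bloop2 q1s q2s cap).1 (bloop2 q1s q2s cap).2)
      ∧ SortedP (mergeQ (bloop2 q1s q2s cap).1 (bloop2 q1s q2s cap).2) := by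
  intro n
  induction n with
  | zero =>
    intro q1s q2s h cap hn hperm hs1 hs2 _ _ _
    have e1 : q1s = [] := List.length_eq_zero_iff.1 (by omega)
    have e2 : q2s = [] := List.length_eq_zero_iff.1 (by omega)
    subst e1; subst e2
    rw [bloop2]
    simp only [List.length_nil, Nat.zero_add, if_pos (by omega : (0:Nat) + 0 ≤ 1)]
    rw [aloop]
    have hl := hperm.length_eq
    rw [mergeQ_length] at hl
    rw [if_pos (show h.length ≤ 1 by simp only [List.length_nil] at hl; omega)]
    exact ⟨hperm, mergeQ_sorted _ _ hs1 hs2⟩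
  | succ n ih =>
    intro q1s q2s h cap hn hperm hs1 hs2 hk1 hk2 hH
    have hLen : h.length = q1s.length + q2s.length := by
      have := hperm.length_eq
      rw [mergeQ_length] at this
      exact this
    by_cases hsmall : q1s.length + q2s.length ≤ 1
    · rw [bloop2, if_pos hsmall, aloop, if_pos (by omega)]
      exact ⟨hperm, mergeQ_sorted _ _ hs1 hs2⟩
    · -- at least two elements in the pool
      have hS := mergeQ_sorted q1s q2s hs1 hs2
      have hne : h ≠ [] := by
        intro e; subst e; simp at hLen; omega
      -- first pop
      have hnz1 : q1s.length + q2s.length ≠ 0 := by omega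
      have hstep1 := mergeQ_step q1s q2s hnz1
      rcases pop_of_sorted h (mergeQ q1s q2s) hperm hS hne with ⟨tail, hse, htail⟩
      rw [hstep1] at hse
      have hx : (ppPop h).1 = (popQ q1s q2s).1 := (List.cons_eq_cons.1 hse).1.symm
      have htl : tail = mergeQ (popQ q1s q2s).2.1 (popQ q1s q2s).2.2 :=
        (List.cons_eq_cons.1 hse).2.symm
      -- second pop
      have e1 := popQ_length q1s q2s hnz1
      have hnz2 : (popQ q1s q2s).2.1.length + (popQ q1s q2s).2.2.length ≠ 0 := by omega
      have hstep2 := mergeQ_step (popQ q1s q2s).2.1 (popQ q1s q2s).2.2 hnz2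
      have hs1' := popQ_sorted1 q1s q2s hs1
      have hs2' := popQ_sorted2 q1s q2s hs2
      have hS' := mergeQ_sorted _ _ hs1' hs2'
      have hne2 : (ppPop h).2 ≠ [] := by
        have := ppPop_length h hne
        intro e; rw [e] at this; simp at this; omega
      have hperm2 : List.Perm (ppPop h).2 (mergeQ (popQ q1s q2s).2.1 (popQ q1s q2s).2.2) :=
        htl ▸ htail
      rcases pop_of_sorted (ppPop h).2 _ hperm2 hS' hne2 with ⟨tail2, hse2, htail2⟩
      rw [hstep2] at hse2
      have hy : (ppPop (ppPop h).2).1 = (popQ (popQ q1s q2s).2.1 (popQ q1s q2s).2.2).1 :=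
        (List.cons_eq_cons.1 hse2).1.symm
      have htl2 : tail2 =
          mergeQ (popQ (popQ q1s q2s).2.1 (popQ q1s q2s).2.2).2.1
                 (popQ (popQ q1s q2s).2.1 (popQ q1s q2s).2.2).2.2 :=
        (List.cons_eq_cons.1 hse2).2.symm
      set x := (popQ q1s q2s).1 with hxdef
      set q1' := (popQ q1s q2s).2.1 with hq1'def
      set q2' := (popQ q1s q2s).2.2 with hq2'def
      set y := (popQ q1' q2').1 with hydef
      set q1'' := (popQ q1' q2').2.1 with hq1''def
      set q2'' := (popQ q1' q2').2.2 with hq2''def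
      rw [aloop, if_neg (show ¬ h.length ≤ 1 by omega), bloop2, if_neg hsmall]
      rw [hx, hy, ← hq1'def, ← hq2'def, ← hxdef, ← hydef, ← hq1''def, ← hq2''def]
      by_cases hcap : x.1 + y.1 ≤ cap
      · -- merge case
        rw [if_pos hcap, if_neg (show ¬ x.1 + y.1 > cap by omega)]
        set m : Int × List Int := (x.1 + y.1, x.2 ++ y.2) with hmdef
        -- memberships
        have hxm : x ∈ q1s ++ q2s := popQ_mem q1s q2s hnz1
        have hym' : y ∈ q1' ++ q2' := popQ_mem q1' q2' hnz2
        have hym : y ∈ q1s ++ q2s := by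
          rcases List.mem_append.1 hym' with hh | hh
          · exact List.mem_append.2 (Or.inl (popQ_sub1 q1s q2s y hh))
          · exact List.mem_append.2 (Or.inr (popQ_sub2 q1s q2s y hh))
        -- key consistency of all pool members
        have hkpool : ∀ z ∈ q1s ++ q2s, z.1 = (z.2.length : Int) := by
          intro z hz
          rcases List.mem_append.1 hz with hh | hh
          · exact hk1 z hh
          · exact hk2 z hh
        have hkx := hkpool x hxm
        have hky := hkpool y hym
        have hkm : m.1 = (m.2.length : Int) := by
          simp only [hmdef, List.length_append]
          push_cast
          omega
        -- survivors are ≥ x and ≥ y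
        have hxle : ∀ z, (z ∈ q1' ∨ z ∈ q2') → leb x z = true :=
          popQ_le q1s q2s hnz1 hs1 hs2
        have hyle : ∀ z, (z ∈ q1'' ∨ z ∈ q2'') → leb y z = true :=
          popQ_le q1' q2' hnz2 hs1' hs2'
        have hsurv : ∀ z, (z ∈ q1'' ∨ z ∈ q2'') → (z ∈ q1' ∨ z ∈ q2') := by
          intro z hz
          rcases hz with hh | hh
          · exact Or.inl (popQ_sub1 q1' q2' z hh)
          · exact Or.inr (popQ_sub2 q1' q2' z hh)
        have hsurvPool : ∀ z, (z ∈ q1'' ∨ z ∈ q2'') → z ∈ q1s ++ q2s := by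
          intro z hz
          rcases hsurv z hz with hh | hh
          · exact List.mem_append.2 (Or.inl (popQ_sub1 q1s q2s z hh))
          · exact List.mem_append.2 (Or.inr (popQ_sub2 q1s q2s z hh))
        -- every old merged partition is ≤ m
        have hq2le : ∀ z ∈ q2s, leb z m = true := by
          intro z hz
          exact hH z hz x (by rcases List.mem_append.1 hxm with hh | hh; exacts [Or.inl hh, Or.inr hh])
                       y (by rcases List.mem_append.1 hym with hh | hh; exacts [Or.inl hh, Or.inr hh])
        -- m ≤ any merge of two new-pool members
        have hGm : ∀ w1, (w1 ∈ q1'' ∨ w1 ∈ q2'' ∨ w1 = m) → ∀ w2, (w2 ∈ q1'' ∨ w2 ∈ q2'' ∨ w2 = m) →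
            leb m (w1.1 + w2.1, w1.2 ++ w2.2) = true := by
          intro w1 h1 w2 h2
          rcases h1 with h1 | h1 | h1
          · rcases h2 with h2 | h2 | h2
            · exact oplus_mono (hxle w1 (hsurv w1 (Or.inl h1))) (hyle w2 (Or.inl h2)) hkx
                (hkpool w1 (hsurvPool w1 (Or.inl h1)))
            · exact oplus_mono (hxle w1 (hsurv w1 (Or.inl h1))) (hyle w2 (Or.inr h2)) hkx
                (hkpool w1 (hsurvPool w1 (Or.inl h1)))
            · subst h2; exact leb_self_oplus_left (hkpool w1 (hsurvPool w1 (Or.inl h1)))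
          · rcases h2 with h2 | h2 | h2
            · exact oplus_mono (hxle w1 (hsurv w1 (Or.inr h1))) (hyle w2 (Or.inl h2)) hkx
                (hkpool w1 (hsurvPool w1 (Or.inr h1)))
            · exact oplus_mono (hxle w1 (hsurv w1 (Or.inr h1))) (hyle w2 (Or.inr h2)) hkx
                (hkpool w1 (hsurvPool w1 (Or.inr h1)))
            · subst h2; exact leb_self_oplus_left (hkpool w1 (hsurvPool w1 (Or.inr h1)))
          · subst h1
            rcases h2 with h2 | h2 | h2
            · exact leb_self_oplus_right (hkpool w2 (hsurvPool w2 (Or.inl h2)))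
            · exact leb_self_oplus_right (hkpool w2 (hsurvPool w2 (Or.inr h2)))
            · subst h2; exact leb_self_oplus_right hkm
        -- invariants of the recursive state
        have hq2''sorted : SortedP (q2'' ++ [m]) := by
          have hbase := popQ_sorted2 q1' q2' hs2'
          refine List.pairwise_append.2 ⟨hbase, List.pairwise_singleton _ _, ?_⟩
          intro z hz m' hm'
          rcases List.mem_singleton.1 hm' with rfl
          exact hq2le z (popQ_sub2 q1s q2s z (popQ_sub2 q1' q2' z hz))
        have hk1'' : KL q1'' := by
          intro z hz
          exact hkpool z (hsurvPool z (Or.inl hz))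
        have hk2'' : KL (q2'' ++ [m]) := by
          intro z hz
          rcases List.mem_append.1 hz with hh | hh
          · exact hkpool z (hsurvPool z (Or.inr hh))
          · rcases List.mem_singleton.1 hh with rfl; exact hkm
        have hH'' : HInv q1'' (q2'' ++ [m]) := by
          intro z hz w1 h1 w2 h2
          have h1' : w1 ∈ q1'' ∨ w1 ∈ q2'' ∨ w1 = m := by
            rcases h1 with hh | hh
            · exact Or.inl hh
            · rcases List.mem_append.1 hh with hh | hh
              · exact Or.inr (Or.inl hh)
              · exact Or.inr (Or.inr (List.mem_singleton.1 hh))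
          have h2' : w2 ∈ q1'' ∨ w2 ∈ q2'' ∨ w2 = m := by
            rcases h2 with hh | hh
            · exact Or.inl hh
            · rcases List.mem_append.1 hh with hh | hh
              · exact Or.inr (Or.inl hh)
              · exact Or.inr (Or.inr (List.mem_singleton.1 hh))
          have hzm : leb z m = true := by
            rcases List.mem_append.1 hz with hh | hh
            · exact hq2le z (popQ_sub2 q1s q2s z (popQ_sub2 q1' q2' z hh))
            · rcases List.mem_singleton.1 hh with rfl; exact leb_refl m
          exact leb_trans z m _ hzm (hGm w1 h1' w2 h2')
        -- lengths
        have e2 := popQ_length q1' q2' hnz2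
        rw [← hq1''def, ← hq2''def] at e2
        have hlen'' : q1''.length + (q2'' ++ [m]).length ≤ n := by
          simp only [List.length_append, List.length_cons, List.length_nil]
          omega
        -- heap-side permutation for the recursive call
        have hpermRec : List.Perm (m :: (ppPop (ppPop h).2).2) (mergeQ q1'' (q2'' ++ [m])) := by
          have hp1 : List.Perm (ppPop (ppPop h).2).2 (mergeQ q1'' q2'') := htl2 ▸ htail2
          have hp2 : List.Perm (mergeQ q1'' (q2'' ++ [m])) (m :: mergeQ q1'' q2'') := by
            refine (mergeQ_perm q1'' (q2'' ++ [m])).trans ?_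
            refine List.Perm.trans ?_ ((mergeQ_perm q1'' q2'').cons m).symm
            have hassoc : q1'' ++ (q2'' ++ [m]) = (q1'' ++ q2'') ++ [m] := by
              rw [List.append_assoc]
            rw [hassoc]
            simpa using (List.perm_middle (a := m) (l₁ := q1'' ++ q2'') (l₂ := []))
          exact (hp1.cons m).trans hp2.symm
        exact ih q1'' (q2'' ++ [m]) (m :: (ppPop (ppPop h).2).2) cap hlen'' hpermRec
          (popQ_sorted1 q1' q2' hs1') hq2''sorted hk1'' hk2'' hH''
      · -- break case
        rw [if_neg hcap, if_pos (show x.1 + y.1 > cap by omega)]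
        have hp : List.Perm ((ppPop h).1 :: (ppPop (ppPop h).2).1 :: (ppPop (ppPop h).2).2)
            (mergeQ q1s q2s) := by
          rw [hstep1, hstep2, hx, hy]
          exact ((htl2 ▸ htail2).cons y).cons x
        rw [hx, hy] at hp
        exact ⟨hp, mergeQ_sorted _ _ hs1 hs2⟩

theorem drain2_eq : ∀ (n : Nat) (q1s q2s : List (Int × List Int)),
    q1s.length + q2s.length ≤ n → drain2 q1s q2s = (mergeQ q1s q2s).map Prod.snd := by
  intro n
  induction n with
  | zero =>
    intro q1s q2s hn
    have e1 : q1s = [] := List.length_eq_zero_iff.1 (by omega)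
    have e2 : q2s = [] := List.length_eq_zero_iff.1 (by omega)
    subst e1; subst e2
    rw [drain2]
    simp [mergeQ]
  | succ n ih =>
    intro q1s q2s hn
    by_cases hz : q1s.length + q2s.length = 0
    · have e1 : q1s = [] := List.length_eq_zero_iff.1 (by omega)
      have e2 : q2s = [] := List.length_eq_zero_iff.1 (by omega)
      subst e1; subst e2
      rw [drain2]
      simp [mergeQ]
    · rw [drain2, dif_neg hz, mergeQ_step q1s q2s hz]
      have := popQ_length q1s q2s hz
      rw [ih _ _ (by omega)]
      simp

theorem equiv_main (loader : List (List Int)) (cap : Int) :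
    prime_post_process loader cap = prime_post_process_alt loader cap := by
  unfold prime_post_process prime_post_process_alt
  set q1 := loader.foldl (fun s p => ins ((p.length : Int), p) s) [] with hq1
  set h0 := loader.map (fun p => ((p.length : Int), p)) with hh0
  have hperm0 : List.Perm h0 (mergeQ q1 []) := by
    rw [mergeQ_nil_right]
    have hp : List.Perm q1 h0 := by simpa using foldl_ins_perm loader []
    exact hp.symm
  have hs1 : SortedP q1 := foldl_ins_sorted loader [] List.Pairwise.nil
  have hk1 : KL q1 := by
    intro z hz
    have : z ∈ h0 := by
      have hp : List.Perm q1 h0 := by simpa using foldl_ins_perm loader []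
      exact hp.mem_iff.1 hz
    rcases List.mem_map.1 this with ⟨p, _, rfl⟩
    rfl
  obtain ⟨P, S⟩ := loop_sim2 (q1.length + [].length) q1 [] h0 cap le_rfl hperm0 hs1
    List.Pairwise.nil hk1 (by intro z hz; simp at hz) (by intro z hz; simp at hz)
  rw [drain_eq _ _ P S,
      drain2_eq ((bloop2 q1 [] cap).1.length + (bloop2 q1 [] cap).2.length) _ _ le_rfl]

-- ===== VERDICT (by name: the statement is the Claim_ definition above) =====
theorem prime_post_process_spec : Claim_equal_prime_post_process := by
  intro loader cap _
  unfold Spec_prime_post_process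
  exact equiv_main loader cap
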